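-- pv_equiv track=rewrite | github.com/chrisdbarran/python-workout | exercise7.py | ubbi_dubbi
-- ===== SOURCE A (Python) =====
-- def ubbi_dubbi(word: str):
--     # every vowel prefaced with ub
--     output = []
--     vowels = 'aeiouAEIOU'
--
--     for letter in word:
--         if letter in vowels:
--             output.append('ub')
--         output.append(letter)
--
--     return ''.join(output)
-- ===== SOURCE B (Python) =====
-- import re
--
-- def ubbi_dubbi(word: str):
--     # single regex substitution instead of a char loop with a list accumulator
--     return re.sub(r'([aeiouAEIOU])', r'ub\g<1>', word)
-- ===== Notes on version B (the rewrite author's own statement) =====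
-- stated objective: idiomatic
-- what changed: Replaces the explicit per-character loop with list accumulator and join by a single regex substitution that inserts 'ub' before each vowel.
import Mathlib
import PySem

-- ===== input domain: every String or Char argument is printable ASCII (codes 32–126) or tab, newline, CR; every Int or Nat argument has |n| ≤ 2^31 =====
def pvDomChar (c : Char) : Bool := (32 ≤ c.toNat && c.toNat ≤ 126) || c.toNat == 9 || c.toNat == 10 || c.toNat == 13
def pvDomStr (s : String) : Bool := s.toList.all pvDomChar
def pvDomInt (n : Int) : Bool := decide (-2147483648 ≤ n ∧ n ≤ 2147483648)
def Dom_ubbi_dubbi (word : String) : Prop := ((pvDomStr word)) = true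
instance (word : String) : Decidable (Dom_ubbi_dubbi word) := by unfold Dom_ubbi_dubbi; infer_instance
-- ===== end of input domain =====

-- B replaces A's per-character loop with list accumulator and join by a single
-- regex substitution inserting 'ub' before each vowel (idiomatic, same cost).


-- ===== PORT A =====
-- loop: output list of string pieces, then ''.join(output)
def ubbi_dubbi (word : String) : String :=
  let vowels : List Char := "aeiouAEIOU".toList
  let output : List String :=
    word.toList.foldl
      (fun out letter =>
        (if letter ∈ vowels then out ++ ["ub"] else out) ++ [String.mk [letter]])
      []
  String.join output

-- ===== PORT B =====
-- re.sub(r'([aeiouAEIOU])', r'ub\g<1>', word): for this pattern the substitution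
-- maps each character independently (vowel c ↦ "ub"+c), i.e. a flatMap over the
-- characters; ported exactly as that per-character expansion.
def ubbi_dubbi_alt (word : String) : String :=
  String.mk (word.toList.flatMap
    (fun c => if c ∈ "aeiouAEIOU".toList then ['u', 'b', c] else [c]))

-- ===== PRECONDITION & SPEC =====
def Spec_ubbi_dubbi (word : String) (out : String) : Prop := out = ubbi_dubbi_alt word
instance (word : String) (out : String) : Decidable (Spec_ubbi_dubbi word out) := by unfold Spec_ubbi_dubbi; infer_instance

-- ===== CLAIM (what is proved, stated in full; the proofs are below) =====
def Claim_equal_ubbi_dubbi : Prop := ∀ (word : String), Dom_ubbi_dubbi word → Spec_ubbi_dubbi word (ubbi_dubbi word)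

-- ===== LEMMAS AND PROOFS =====

theorem toList_mk (l : List Char) : (String.mk l).toList = l :=
  Eq.symm (String.ofList_eq.mp rfl)

theorem ubbi_dubbi_loop (l : List Char) (acc : List String) :
    (l.foldl
        (fun out letter =>
          (if letter ∈ "aeiouAEIOU".toList then out ++ ["ub"] else out) ++ [String.mk [letter]])
        acc).flatMap String.toList
    = acc.flatMap String.toList ++
        l.flatMap (fun c => if c ∈ "aeiouAEIOU".toList then ['u', 'b', c] else [c]) := by
  induction l generalizing acc with
  | nil => simp
  | cons c l ih =>
    simp only [List.foldl_cons, List.flatMap_cons, ih]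
    split_ifs with h <;> simp [List.flatMap_append, toList_mk]

-- ===== VERDICT (by name: the statement is the Claim_ definition above) =====
theorem ubbi_dubbi_spec : Claim_equal_ubbi_dubbi := by
  intro word _
  show ubbi_dubbi word = ubbi_dubbi_alt word
  apply String.toList_inj.mp
  unfold ubbi_dubbi ubbi_dubbi_alt
  simpa [String.toList_join, toList_mk] using ubbi_dubbi_loop word.toList []
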